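-- pv_equiv track=rewrite | github.com/JinbaeByeon/RiotAPI | 연습문제 풀이/midtest_04.py | f
-- ===== SOURCE A (Python) =====
-- def f(K,N):
--     if N==0 or N==1:
--         return N
--     else:
--         if N % (2**(K)-1) == 0:
--             return f(K-1,2**(K-1)-1)*2 + K
--
--         i = 0
--         while True:
--             i += 1
--             if N <= 2**(K-1) or (N-2**(K-1)) // (2**(K-i-1)) > 0 :
--                 break
--         return f(K-1,2**(K-1)-1) + f(K-i,N-2**(K-1)) + K
-- ===== SOURCE B (Python) =====
-- def f(K, N):
--     # Iterative re-implementation: the repeated f(K-1, 2**(K-1)-1) chain has the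
--     # closed form 2**K - K - 1, and the loop index i of A equals
--     # max(1, K - (N - 2**(K-1)).bit_length()); so one accumulator loop suffices.
--     acc = 0
--     while N != 0 and N != 1:
--         if N % (2**K - 1) == 0:
--             return acc + 2**(K + 1) - K - 2
--         acc += 2**K - 1
--         N -= 2**(K - 1)
--         K = K - 1 if N <= 0 else min(K - 1, max(1, N.bit_length()))
--     return acc + N
-- ===== Notes on version B (the rewrite author's own statement) =====
-- stated objective: faster
-- what changed: Replaces A's recursion (which re-derives f(K-1,2**(K-1)-1) at every level, O(K^2) subcalls, plus an inner linear search for i) with a single O(K) accumulator loop: the repeated chain has the closed form 2**K - K - 1 and the loop index i equals max(1, K - (N-2**(K-1)).bit_length()).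
import Mathlib
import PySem

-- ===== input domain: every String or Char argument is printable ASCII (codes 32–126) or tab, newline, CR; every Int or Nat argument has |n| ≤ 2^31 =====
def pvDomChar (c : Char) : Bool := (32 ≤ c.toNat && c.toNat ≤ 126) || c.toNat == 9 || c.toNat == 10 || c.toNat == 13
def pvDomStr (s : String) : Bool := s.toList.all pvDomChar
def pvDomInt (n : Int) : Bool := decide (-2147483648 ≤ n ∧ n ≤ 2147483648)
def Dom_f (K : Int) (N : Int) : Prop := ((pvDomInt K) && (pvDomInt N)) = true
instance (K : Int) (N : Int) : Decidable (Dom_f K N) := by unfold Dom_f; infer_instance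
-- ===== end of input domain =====

-- B replaces A's O(K^2) recursion by one O(K) accumulator loop (closed form for the
-- repeated f(K-1, 2^(K-1)-1) chain, bit_length for A's inner while-loop index).

-- ===== PORT A =====
-- A's inner `while True: i += 1; if … break` loop; Python increments i, then tests.
-- Exponents 2**(K-1), 2**(K-i-1) are taken at .toNat: under Pre_f every reachable
-- state has K ≥ 1 and, when the second disjunct is decisive, K-i-1 ≥ 0, so this is exact.
-- Fuel K.toNat bounds the loop (it breaks at i = 1 or by i = K-1); never exhausted under Pre_f.
def fLoopI (K : Int) (N : Int) : Nat → Int → Int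
  | 0, i => i
  | fuel + 1, i =>
    let i := i + 1
    if N ≤ 2 ^ ((K - 1).toNat) ∨
        0 < PySem.Int.floordiv (N - 2 ^ ((K - 1).toNat)) (2 ^ ((K - i - 1).toNat)) then i
    else fLoopI K N fuel i

-- A's recursion, fuelled: every recursive call strictly decreases K, so fuel K.toNat + 1
-- is never exhausted under Pre_f (1 ≤ K, or the N ∈ {0,1} base case).
def fAux : Nat → Int → Int → Int
  | 0, _, N => N
  | fuel + 1, K, N =>
    if N = 0 ∨ N = 1 then N
    else if PySem.Int.mod N (2 ^ K.toNat - 1) = 0 then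
      fAux fuel (K - 1) (2 ^ ((K - 1).toNat) - 1) * 2 + K
    else
      let i := fLoopI K N K.toNat 0
      fAux fuel (K - 1) (2 ^ ((K - 1).toNat) - 1) +
        fAux fuel (K - i) (N - 2 ^ ((K - 1).toNat)) + K

def f (K : Int) (N : Int) : Int := fAux (K.toNat + 1) K N

-- ===== PORT B =====
-- Source B's while-loop; K strictly decreases each iteration, so fuel K.toNat + 1 suffices under Pre_f.
def gAux : Nat → Int → Int → Int → Int
  | 0, _, N, acc => acc + N
  | fuel + 1, K, N, acc =>
    if N ≠ 0 ∧ N ≠ 1 then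
      if PySem.Int.mod N (2 ^ K.toNat - 1) = 0 then acc + 2 ^ ((K + 1).toNat) - K - 2
      else
        let acc' := acc + 2 ^ K.toNat - 1
        let N' := N - 2 ^ ((K - 1).toNat)
        let K' := if N' ≤ 0 then K - 1
                  else min (K - 1) (max 1 ((PySem.Int.bitLength N' : Int)))
        gAux fuel K' N' acc'
    else acc + N

def f_alt (K : Int) (N : Int) : Int := gAux (K.toNat + 1) K N 0

-- ===== PRECONDITION & SPEC =====
-- Pre_f: exactly where A returns. For K ≤ 0 with N ∉ {0,1} Python's A raises
-- (2**0-1 = 0 gives ZeroDivisionError; for K < 0 the float chain never reaches a base case).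
def Pre_f (K : Int) (N : Int) : Prop := 1 ≤ K ∨ N = 0 ∨ N = 1
instance (K : Int) (N : Int) : Decidable (Pre_f K N) := by unfold Pre_f; infer_instance
def pvWitness_f : Int × Int := (3, 5)

def Spec_f (K : Int) (N : Int) (out : Int) : Prop := out = f_alt K N
instance (K : Int) (N : Int) (out : Int) : Decidable (Spec_f K N out) := by unfold Spec_f; infer_instance

-- ===== CLAIM (what is proved, stated in full; the proofs are below) =====
def Claim_equal_f : Prop := ∀ (K : Int) (N : Int), Dom_f K N → Pre_f K N → Spec_f K N (f K N)

-- ===== LEMMAS AND PROOFS =====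

theorem bitLength_pos (n : Int) (h : 1 ≤ n) : 1 ≤ PySem.Int.bitLength n := by
  have := PySem.Int.lt_two_pow_bitLength n
  by_contra hb
  have hb0 : PySem.Int.bitLength n = 0 := by omega
  rw [hb0] at this
  simp at this
  omega

theorem cond_iff (N' : Int) (hN' : 1 ≤ N') (e : Nat) :
    (0 < PySem.Int.floordiv N' (2 ^ e)) ↔ e < PySem.Int.bitLength N' := by
  have hd : (0:Int) < 2 ^ e := by positivity
  have h1 : (0 < PySem.Int.floordiv N' (2 ^ e)) ↔ 1 ≤ PySem.Int.floordiv N' (2 ^ e) := by omega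
  rw [h1, PySem.Int.le_floordiv_iff_mul_le hd, one_mul]
  have habs : (N'.natAbs : Int) = N' := by omega
  have hup := PySem.Int.lt_two_pow_bitLength N'
  have hlo := PySem.Int.two_pow_bitLength_le N' (by omega)
  constructor
  · intro h
    have : (2:Nat) ^ e < 2 ^ PySem.Int.bitLength N' := by
      calc (2:Nat) ^ e ≤ N'.natAbs := by exact_mod_cast habs ▸ h
      _ < 2 ^ PySem.Int.bitLength N' := hup
    exact (Nat.pow_lt_pow_iff_right (by norm_num)).mp this
  · intro h
    have : (2:Nat) ^ e ≤ N'.natAbs := by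
      calc (2:Nat) ^ e ≤ 2 ^ (PySem.Int.bitLength N' - 1) :=
        Nat.pow_le_pow_right (by norm_num) (by omega)
      _ ≤ N'.natAbs := hlo
    calc (2:Int) ^ e = ((2 ^ e : Nat) : Int) := by push_cast; ring
    _ ≤ (N'.natAbs : Int) := by exact_mod_cast this
    _ = N' := habs

theorem fLoopI_descent (K N : Int) (hN : 2 ^ ((K - 1).toNat) < N) :
    ∀ (fuel : Nat) (i : Int), 0 ≤ i →
      i < max 1 (K - (PySem.Int.bitLength (N - 2 ^ ((K - 1).toNat)) : Int)) →
      (max 1 (K - (PySem.Int.bitLength (N - 2 ^ ((K - 1).toNat)) : Int)) - i).toNat ≤ fuel →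
      fLoopI K N fuel i = max 1 (K - (PySem.Int.bitLength (N - 2 ^ ((K - 1).toNat)) : Int)) := by
  set N' := N - 2 ^ ((K - 1).toNat) with hN'def
  set bl := PySem.Int.bitLength N' with hbldef
  set t := max 1 (K - (bl : Int)) with htdef
  have hN'1 : 1 ≤ N' := by omega
  have hbl1 : 1 ≤ bl := hbldef ▸ bitLength_pos N' hN'1
  intro fuel
  induction fuel with
  | zero => intro i h0 hlt hf; omega
  | succ fuel ih =>
    intro i h0 hlt hf
    simp only [fLoopI]
    rw [← hN'def]
    by_cases hstop : i + 1 = t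
    · rw [if_pos]
      · exact hstop
      · right
        rw [cond_iff N' hN'1 _]
        rw [← hbldef]
        omega
    · rw [if_neg]
      · exact ih (i + 1) (by omega) (by omega) (by omega)
      · push_neg
        constructor
        · omega
        · rw [← not_lt, cond_iff N' hN'1 _, ← hbldef]
          omega

theorem fLoopI_eq (K N : Int) (hK : 2 ≤ K) :
    fLoopI K N K.toNat 0 =
      if N ≤ 2 ^ ((K - 1).toNat) then 1
      else max 1 (K - (PySem.Int.bitLength (N - 2 ^ ((K - 1).toNat)) : Int)) := by
  split_ifs with h
  · have h2 : K.toNat = (K.toNat - 1) + 1 := by omega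
    rw [h2]
    simp only [fLoopI]
    rw [if_pos (Or.inl (by omega))]
    norm_num
  · set N' := N - 2 ^ ((K - 1).toNat) with hN'def
    have hN'1 : 1 ≤ N' := by omega
    have hbl1 : 1 ≤ PySem.Int.bitLength N' := bitLength_pos N' hN'1
    exact fLoopI_descent K N (by omega) K.toNat 0 le_rfl (by omega) (by omega)

theorem fAux_chain : ∀ (fuel : Nat) (m : Int), 0 ≤ m → m.toNat < fuel →
    fAux fuel m (2 ^ m.toNat - 1) = 2 ^ ((m + 1).toNat) - m - 2 := by
  intro fuel
  induction fuel with
  | zero => intro m _ h; omega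
  | succ fuel ih =>
    intro m h0 hlt
    by_cases hm0 : m = 0
    · subst hm0; simp [fAux]
    by_cases hm1 : m = 1
    · subst hm1; simp [fAux]
    · have hm2 : 2 ≤ m := by omega
      have hk : 2 ≤ m.toNat := by omega
      have hpow : (4:Int) ≤ 2 ^ m.toNat := by
        calc (4:Int) = 2 ^ 2 := by norm_num
        _ ≤ 2 ^ m.toNat := by exact pow_le_pow_right₀ (by norm_num) hk
      simp only [fAux]
      rw [if_neg (by omega)]
      rw [if_pos (by rw [PySem.Int.mod_eq_zero_iff_dvd])]
      rw [ih (m - 1) (by omega) (by omega)]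
      have e1 : (m - 1 + 1) = m := by ring
      have e2 : (m + 1).toNat = m.toNat + 1 := by omega
      rw [e1, e2, pow_succ]
      ring

theorem gAux_eq_fAux : ∀ (fuel : Nat) (K N acc : Int), 1 ≤ K → K.toNat < fuel →
    gAux fuel K N acc = acc + fAux fuel K N := by
  intro fuel
  induction fuel with
  | zero => intro K N acc hK h; omega
  | succ fuel ih =>
    intro K N acc hK hlt
    simp only [gAux, fAux]
    by_cases hbase : N = 0 ∨ N = 1
    · rw [if_neg (by tauto), if_pos hbase]
    · rw [if_pos (by tauto), if_neg hbase]
      have eK : K - 1 + 1 = K := by ring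
      have eK1 : (K + 1).toNat = K.toNat + 1 := by omega
      by_cases hmod : PySem.Int.mod N (2 ^ K.toNat - 1) = 0
      · rw [if_pos hmod, if_pos hmod,
          fAux_chain fuel (K - 1) (by omega) (by omega), eK, eK1, pow_succ]
        ring
      · have hK2 : 2 ≤ K := by
          by_contra h
          have h1 : K = 1 := by omega
          rw [h1] at hmod
          norm_num [PySem.Int.mod_eq_zero_iff_dvd] at hmod
        rw [if_neg hmod, if_neg hmod,
          fAux_chain fuel (K - 1) (by omega) (by omega), eK,
          fLoopI_eq K N hK2]
        set N' := N - 2 ^ ((K - 1).toNat) with hN'def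
        by_cases hle : N ≤ 2 ^ ((K - 1).toNat)
        · rw [if_pos hle, if_pos (show N' ≤ 0 by omega),
            ih (K - 1) N' _ (by omega) (by omega)]
          ring
        · rw [if_neg hle, if_neg (show ¬ N' ≤ 0 by omega)]
          have hN'1 : 1 ≤ N' := by omega
          have hbl1 : 1 ≤ PySem.Int.bitLength N' := bitLength_pos N' hN'1
          have hKe : min (K - 1) (max 1 ((PySem.Int.bitLength N' : Int))) =
              K - max 1 (K - (PySem.Int.bitLength N' : Int)) := by omega
          rw [hKe, ih (K - max 1 (K - (PySem.Int.bitLength N' : Int))) N' _ (by omega) (by omega)]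
          ring

-- ===== VERDICT (by name: the statement is the Claim_ definition above) =====
theorem f_spec : Claim_equal_f := by
  intro K N _ hpre
  unfold Spec_f f f_alt
  rcases hpre with hK | hN
  · rw [gAux_eq_fAux (K.toNat + 1) K N 0 hK (by omega)]; omega
  · have h1 : K.toNat + 1 = Nat.succ K.toNat := rfl
    rw [h1]
    simp only [fAux, gAux]
    rcases hN with h | h <;> simp [h]
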